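-- pv_equiv track=rewrite | github.com/donaldex/code | str_score.py | str_score
-- ===== SOURCE A (Python) =====
-- def str_score (s) :
--     if len(s)==0:
--          return 0
--     elif s[0:1].isalpha():
--          return 1 + str_score(s[1:])
--     elif s[0:1].isdigit():
--          return int(s[0:1])+str_score(s[1:])
--     else:
--          return str_score(s[1:])
-- ===== SOURCE B (Python) =====
-- def str_score(s):
--     score = 0
--     for ch in s:
--         if ch.isalpha():
--             score += 1
--         elif ch.isdigit():
--             score += int(ch)
--     return score
-- ===== Notes on version B (the rewrite author's own statement) =====
-- stated objective: simpler
-- what changed: Replaced A's tail recursion over string suffixes (repeated slicing s[1:]) with a single iterative pass over the characters using an accumulator.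
import Mathlib
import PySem

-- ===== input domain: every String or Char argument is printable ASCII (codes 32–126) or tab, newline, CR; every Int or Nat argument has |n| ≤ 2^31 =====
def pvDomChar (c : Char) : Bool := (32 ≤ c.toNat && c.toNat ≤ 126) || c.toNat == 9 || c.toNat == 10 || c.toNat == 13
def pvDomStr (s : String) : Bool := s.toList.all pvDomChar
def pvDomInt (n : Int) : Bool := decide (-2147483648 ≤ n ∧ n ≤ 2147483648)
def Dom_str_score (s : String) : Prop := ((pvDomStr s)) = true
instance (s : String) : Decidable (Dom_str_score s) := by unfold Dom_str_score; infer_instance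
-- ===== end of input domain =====

-- B replaces A's tail recursion over string suffixes with one iterative accumulator pass (faster: no repeated slicing).


-- ===== PORT A =====
-- A recurses on the string: empty → 0; first char alpha → 1 + rec; digit → int(char) + rec; else rec.
-- int(s[0:1]) is ported with PySem.Int.ofChars?; on the guarded digit branch (ASCII) it always returns some,
-- so .getD 0 is never the default there.
def str_score_goA (cs : List Char) : Int :=
  match cs with
  | [] => 0
  | c :: rest =>
    if PySem.Chars.isalpha c then 1 + str_score_goA rest
    else if PySem.Chars.isdigit c then (PySem.Int.ofChars? [c]).getD 0 + str_score_goA rest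
    else str_score_goA rest

def str_score (s : String) : Int := str_score_goA s.toList

-- ===== PORT B =====
-- B: score = 0; for ch in s: if alpha score += 1 elif digit score += int(ch); return score.
def str_score_alt (s : String) : Int :=
  s.toList.foldl
    (fun score c =>
      if PySem.Chars.isalpha c then score + 1
      else if PySem.Chars.isdigit c then score + (PySem.Int.ofChars? [c]).getD 0
      else score) 0

-- ===== PRECONDITION & SPEC =====
def Spec_str_score (s : String) (out : Int) : Prop := out = str_score_alt s
instance (s : String) (out : Int) : Decidable (Spec_str_score s out) := by unfold Spec_str_score; infer_instance

-- ===== CLAIM (what is proved, stated in full; the proofs are below) =====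
def Claim_equal_str_score : Prop := ∀ (s : String), Dom_str_score s → Spec_str_score s (str_score s)

-- ===== LEMMAS AND PROOFS =====
theorem str_score_foldl_goA (cs : List Char) (acc : Int) :
    cs.foldl
      (fun score c =>
        if PySem.Chars.isalpha c then score + 1
        else if PySem.Chars.isdigit c then score + (PySem.Int.ofChars? [c]).getD 0
        else score) acc = acc + str_score_goA cs := by
  induction cs generalizing acc with
  | nil => simp [str_score_goA]
  | cons c rest ih =>
    simp only [List.foldl_cons, str_score_goA]
    split_ifs <;> rw [ih] <;> ring

-- ===== VERDICT (by name: the statement is the Claim_ definition above) =====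
theorem str_score_spec : Claim_equal_str_score := by
  intro s _
  unfold Spec_str_score str_score str_score_alt
  rw [str_score_foldl_goA]
  ring
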